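-- pv_equiv track=rewrite | github.com/ncarsner/code-katas | abstract_use_cases/bracket_forecast.py | generate_final_four_outcomes
-- ===== SOURCE A (Python) =====
-- from itertools import product
-- from typing import Dict, List, Tuple, Optional
--
-- def generate_final_four_outcomes(final_four: Dict[str, List[str]]) -> List[Dict[str, str]]:
--     """
--     Generate all possible Final Four combinations.
--     Each region must send one team to the Final Four.
--     Returns list of dicts mapping region to team.
--     """
--     regions = list(final_four.keys())
--     region_teams = [final_four[region] for region in regions]
--
--     # Generate all combinations (one team from each region)
--     combinations = list(product(*region_teams))
--
--     # Convert to structured format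
--     outcomes = []
--     for combo in combinations:
--         outcome = {region: team for region, team in zip(regions, combo)}
--         outcomes.append(outcome)
--
--     return outcomes
-- ===== SOURCE B (Python) =====
-- def generate_final_four_outcomes(final_four):
--     """Build the product by folding over the regions: keep a list of partial
--     region->team assignments and extend each by every team of the next region
--     (last region varies fastest, like itertools.product)."""
--     outcomes = [{}]
--     for region, teams in final_four.items():
--         outcomes = [{**p, region: t} for p in outcomes for t in teams]
--     return outcomes
-- ===== Notes on version B (the rewrite author's own statement) =====
-- stated objective: alternative
-- what changed: Replaces the itertools.product call plus the zip/dict-comprehension conversion pass by a single fold over the regions that grows a list of partial region->team assignment dicts, extending every partial dict with each team of the current region.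
import Mathlib
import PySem

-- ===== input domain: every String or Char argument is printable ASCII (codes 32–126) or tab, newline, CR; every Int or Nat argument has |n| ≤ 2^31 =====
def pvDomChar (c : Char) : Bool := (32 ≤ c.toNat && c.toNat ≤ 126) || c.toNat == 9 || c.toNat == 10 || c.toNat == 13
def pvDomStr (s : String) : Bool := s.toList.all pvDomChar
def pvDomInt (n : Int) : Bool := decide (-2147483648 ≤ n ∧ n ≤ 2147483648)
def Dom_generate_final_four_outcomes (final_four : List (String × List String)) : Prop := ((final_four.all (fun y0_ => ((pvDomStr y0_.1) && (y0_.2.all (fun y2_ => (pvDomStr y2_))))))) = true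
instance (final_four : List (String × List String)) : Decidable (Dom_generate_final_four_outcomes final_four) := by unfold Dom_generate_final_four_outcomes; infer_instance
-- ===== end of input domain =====

-- Alternative decomposition: B builds the product by folding over the regions,
-- growing a list of partial assignments, instead of itertools.product + a conversion pass.


-- ===== PORT A =====
-- itertools.product(*lists): rightmost list varies fastest.
def pyProduct (ls : List (List String)) : List (List String) :=
  match ls with
  | [] => [[]]
  | xs :: rest => xs.flatMap (fun x => (pyProduct rest).map (fun c => x :: c))

def generate_final_four_outcomes (final_four : List (String × List String)) : List (List (String × String)) :=
  let d := PySem.Dict.ofList final_four        -- the Python dict argument (duplicate keys overwrite)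
  let regions := d.keys
  let region_teams := regions.map (fun r => d.getD r [])  -- final_four[region]; region ∈ keys, so no KeyError
  let combinations := pyProduct region_teams
  -- outcome = {region: team for region, team in zip(regions, combo)}
  combinations.map (fun combo => (PySem.Dict.ofList (regions.zip combo)).items)

-- ===== PORT B =====
def generate_final_four_outcomes_alt (final_four : List (String × List String)) : List (List (String × String)) :=
  let d := PySem.Dict.ofList final_four
  -- {**p, region: t}: region is a fresh key for p (dict keys are distinct, added in order), so it appends
  d.items.foldl (fun outs rt => outs.flatMap (fun p => rt.2.map (fun t => p ++ [(rt.1, t)]))) [[]]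

-- ===== PRECONDITION & SPEC =====
def Spec_generate_final_four_outcomes (final_four : List (String × List String)) (out : List (List (String × String))) : Prop := out = generate_final_four_outcomes_alt final_four
instance (final_four : List (String × List String)) (out : List (List (String × String))) : Decidable (Spec_generate_final_four_outcomes final_four out) := by unfold Spec_generate_final_four_outcomes; infer_instance

-- ===== CLAIM (what is proved, stated in full; the proofs are below) =====
def Claim_equal_generate_final_four_outcomes : Prop := ∀ (final_four : List (String × List String)), Dom_generate_final_four_outcomes final_four → Spec_generate_final_four_outcomes final_four (generate_final_four_outcomes final_four)

-- ===== LEMMAS AND PROOFS =====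

def combosOf (L : List (String × List String)) : List (List (String × String)) :=
  match L with
  | [] => [[]]
  | (r, ts) :: rest => ts.flatMap (fun t => (combosOf rest).map (fun c => (r, t) :: c))

theorem map_fst_zip_sublist {α β : Type} (l : List α) (l' : List β) :
    ((l.zip l').map Prod.fst).Sublist l := by
  induction l generalizing l' with
  | nil => simp
  | cons a l ih =>
    cases l' with
    | nil => simp
    | cons b l' => simpa using (ih l').cons₂ a

theorem ofList_items_of_nodup (l : List (String × String)) (h : (l.map Prod.fst).Nodup) :
    (PySem.Dict.ofList l).items = l := by
  have h1 := PySem.Dict.items_foldl_insert_fresh (l := l) (k := Prod.fst) (v := Prod.snd)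
    (d := PySem.Dict.empty) (by intro a _; exact PySem.Dict.contains_empty _) h
  simpa [PySem.Dict.ofList, PySem.Dict.update] using h1

theorem a_zip (L : List (String × List String)) :
    (pyProduct (L.map Prod.snd)).map (fun c => (L.map Prod.fst).zip c) = combosOf L := by
  induction L with
  | nil => simp [pyProduct, combosOf]
  | cons rt rest ih =>
    obtain ⟨r, ts⟩ := rt
    simp only [List.map_cons, pyProduct, combosOf, List.map_flatMap, List.map_map]
    rw [← ih]
    simp [List.map_map, Function.comp_def, List.zip_cons_cons]

theorem b_side (L : List (String × List String)) (outs : List (List (String × String))) :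
    L.foldl (fun outs rt => outs.flatMap (fun p => rt.2.map (fun t => p ++ [(rt.1, t)]))) outs
      = outs.flatMap (fun p => (combosOf L).map (fun c => p ++ c)) := by
  induction L generalizing outs with
  | nil => simp [combosOf]
  | cons rt rest ih =>
    rw [List.foldl_cons, ih]
    obtain ⟨r, ts⟩ := rt
    simp [combosOf, List.flatMap_map, List.map_flatMap, List.flatMap_assoc, List.append_assoc,
      Function.comp_def]

theorem a_side (L : List (String × List String)) (h : (L.map Prod.fst).Nodup) :
    (pyProduct (L.map Prod.snd)).map
        (fun c => (PySem.Dict.ofList ((L.map Prod.fst).zip c)).items) = combosOf L := by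
  rw [← a_zip L]
  apply List.map_congr_left
  intro c _
  exact ofList_items_of_nodup _ (h.sublist (map_fst_zip_sublist _ _))

theorem keys_eq_map_fst (d : PySem.Dict String (List String)) : d.keys = d.items.map Prod.fst := rfl

-- ===== VERDICT (by name: the statement is the Claim_ definition above) =====
theorem generate_final_four_outcomes_spec : Claim_equal_generate_final_four_outcomes := by
  intro ff _
  unfold Spec_generate_final_four_outcomes generate_final_four_outcomes generate_final_four_outcomes_alt
  have hnd := PySem.Dict.nodup_keys_ofList (ν := List String) ff
  have hv : (PySem.Dict.ofList ff).keys.map (fun r => (PySem.Dict.ofList ff).getD r []) =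
      (PySem.Dict.ofList ff).items.map Prod.snd := by
    have := (PySem.Dict.values_eq_map_keys (PySem.Dict.ofList ff) hnd []).symm
    simpa [PySem.Dict.values] using this
  simp only [keys_eq_map_fst] at hv hnd ⊢
  rw [hv, a_side _ hnd, b_side]
  simp
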